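-- pv_equiv track=rewrite | github.com/SyaneAndrade/LeetCodeSolvedProblems | center_cluster.py | verifyMaxCluster
-- ===== SOURCE A (Python) =====
-- def verifyMaxCluster(bootingPower, processingPower, maxPower):
--     left = 0
--     right = 1
--     calculate_power = 0
--     cluster_count = 0
--     qtde_cluster = 0
--     while (left < len(bootingPower)) and (right < len(bootingPower)):
--         calculate_power = calculatePower(bootingPower[left:right], processingPower[left:right])
--         if calculate_power > maxPower:
--             left += 1
--             qtde_cluster = max(qtde_cluster, cluster_count)
--             cluster_count -= 1
--             if left == right:
--                 right += 1
--                 cluster_count = 0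
--         else:
--             right += 1
--             cluster_count += 1
--     return max(qtde_cluster, cluster_count)
--
-- def calculatePower(bootingPower, processingPower):
--     max_bp = max(bootingPower)
--     sum_pp = sum(processingPower)
--     k = len(bootingPower)
--     return max_bp + (sum_pp * k)
-- ===== SOURCE B (Python) =====
-- def verifyMaxCluster(bootingPower, processingPower, maxPower):
--     # Same window walk as A, but maintains a running sum of the processing
--     # powers and a monotonic max-deque over booting powers, instead of
--     # recomputing max/sum over a fresh slice every iteration.
--     n = len(bootingPower)
--     m = len(processingPower)
--     if n == 0:
--         return 0
--     dq = []   # indices of window elements, bootingPower values strictly decreasing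
--     hd = 0    # dq[hd:] is the live deque (hd advances instead of popping from the front)
--     s = 0     # sum(processingPower[left:right]) (slice silently truncated at m, as in A)
--
--     def push(i):
--         nonlocal s
--         if i < m:
--             s += processingPower[i]
--         while len(dq) > hd and bootingPower[dq[-1]] <= bootingPower[i]:
--             dq.pop()
--         dq.append(i)
--
--     push(0)
--     left = 0
--     right = 1
--     best = 0
--     while left < n and right < n:
--         power = bootingPower[dq[hd]] + s * (right - left)
--         if power > maxPower:
--             best = max(best, right - left - 1)
--             if hd < len(dq) and dq[hd] == left:
--                 hd += 1
--             if left < m: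
--                 s -= processingPower[left]
--             left += 1
--             if left == right:
--                 right += 1
--                 push(right - 1)
--         else:
--             right += 1
--             push(right - 1)
--     return max(best, right - left - 1)
-- ===== Notes on version B (the rewrite author's own statement) =====
-- stated objective: faster
-- what changed: Replaces A's per-iteration recomputation of max/sum over a fresh slice (calculatePower on bootingPower[l:r]) with a running sum of processingPower and a monotonic max-deque over bootingPower maintained incrementally across the same two-pointer walk.
import Mathlib
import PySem

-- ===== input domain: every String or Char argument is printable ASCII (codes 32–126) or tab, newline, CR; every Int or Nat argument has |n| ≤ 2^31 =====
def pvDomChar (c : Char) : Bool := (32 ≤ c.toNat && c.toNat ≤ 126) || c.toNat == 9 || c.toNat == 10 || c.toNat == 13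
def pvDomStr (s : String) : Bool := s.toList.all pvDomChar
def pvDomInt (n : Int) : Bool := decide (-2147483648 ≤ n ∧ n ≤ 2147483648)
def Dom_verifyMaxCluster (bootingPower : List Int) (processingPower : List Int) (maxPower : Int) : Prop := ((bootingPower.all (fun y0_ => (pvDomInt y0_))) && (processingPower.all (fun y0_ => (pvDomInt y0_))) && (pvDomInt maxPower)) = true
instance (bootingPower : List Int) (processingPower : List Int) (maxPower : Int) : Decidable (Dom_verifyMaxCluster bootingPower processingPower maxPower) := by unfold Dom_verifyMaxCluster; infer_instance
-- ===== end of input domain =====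

-- B replaces A's per-iteration max/sum recomputation over fresh slices by a running sum and a
-- monotonic max-deque maintained incrementally across the same two-pointer walk (same return value).


-- ===== PORT A =====
-- helper calculatePower: Python's max() raises on an empty list; every call below passes a
-- nonempty slice (left < right is a loop invariant of A), so the `.getD 0` default is unreachable.
def calculatePower (bootingPower : List Int) (processingPower : List Int) : Int :=
  (PySem.List.max? bootingPower (fun y => y)).getD 0
    + processingPower.sum * (bootingPower.length : Int)

-- the while loop of A (left/right are the pointers, always nonnegative in Python, hence Nat)
def loopA (bp pp : List Int) (mx : Int) (l r : Nat) (cc q : Int) : Int :=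
  if h : l < bp.length ∧ r < bp.length then
    if calculatePower (PySem.List.slice bp (some (l : Int)) (some (r : Int)))
                      (PySem.List.slice pp (some (l : Int)) (some (r : Int))) > mx then
      if l + 1 = r then loopA bp pp mx (l+1) (r+1) 0 (max q cc)
      else loopA bp pp mx (l+1) r (cc - 1) (max q cc)
    else loopA bp pp mx l (r+1) (cc+1) q
  else max q cc
termination_by (bp.length - l) + (bp.length - r)
decreasing_by all_goals omega

def verifyMaxCluster (bootingPower : List Int) (processingPower : List Int) (maxPower : Int) : Int :=
  loopA bootingPower processingPower maxPower 0 1 0 0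

-- ===== PORT B =====
-- Source B push: `while len(dq) > hd and bp[dq[-1]] <= bp[i]: dq.pop()` then `dq.append(i)`
def dqPush (bp : List Int) (dq : List Nat) (hd : Nat) (i : Nat) : List Nat :=
  if hd < dq.length ∧ bp.getD (dq.getLast?.getD 0) 0 ≤ bp.getD i 0 then
    dqPush bp dq.dropLast hd i
  else dq ++ [i]
termination_by dq.length
decreasing_by simp_all; omega

-- Source B push: `if i < m: s += processingPower[i]`
def pushS (pp : List Int) (s : Int) (i : Nat) : Int :=
  if i < pp.length then s + pp.getD i 0 else s

-- Source B: `if hd < len(dq) and dq[hd] == left: hd += 1`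
def hdAdv (dq : List Nat) (hd l : Nat) : Nat :=
  if hd < dq.length ∧ dq.getD hd 0 = l then hd + 1 else hd

-- Source B: `if left < m: s -= processingPower[left]`
def sPop (pp : List Int) (s : Int) (l : Nat) : Int :=
  if l < pp.length then s - pp.getD l 0 else s

-- the while loop of B (dq.drop hd is the live deque; hd advances instead of popping the front)
def loopB (bp pp : List Int) (mx : Int) (l r : Nat) (s : Int) (dq : List Nat) (hd : Nat)
    (best : Int) : Int :=
  if h : l < bp.length ∧ r < bp.length then
    if bp.getD (dq.getD hd 0) 0 + s * ((r : Int) - (l : Int)) > mx then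
      if l + 1 = r then
        loopB bp pp mx (l+1) (r+1) (pushS pp (sPop pp s l) r)
          (dqPush bp dq (hdAdv dq hd l) r) (hdAdv dq hd l)
          (max best ((r : Int) - (l : Int) - 1))
      else
        loopB bp pp mx (l+1) r (sPop pp s l) dq (hdAdv dq hd l)
          (max best ((r : Int) - (l : Int) - 1))
    else loopB bp pp mx l (r+1) (pushS pp s r) (dqPush bp dq hd r) hd best
  else max best ((r : Int) - (l : Int) - 1)
termination_by (bp.length - l) + (bp.length - r)
decreasing_by all_goals omega

def verifyMaxCluster_alt (bootingPower : List Int) (processingPower : List Int) (maxPower : Int) : Int :=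
  if bootingPower.length = 0 then 0
  else
    loopB bootingPower processingPower maxPower 0 1
      (pushS processingPower 0 0) (dqPush bootingPower [] 0 0) 0 0

-- ===== PRECONDITION & SPEC =====
def Spec_verifyMaxCluster (bootingPower : List Int) (processingPower : List Int) (maxPower : Int) (out : Int) : Prop := out = verifyMaxCluster_alt bootingPower processingPower maxPower
instance (bootingPower : List Int) (processingPower : List Int) (maxPower : Int) (out : Int) : Decidable (Spec_verifyMaxCluster bootingPower processingPower maxPower out) := by unfold Spec_verifyMaxCluster; infer_instance

-- ===== CLAIM (what is proved, stated in full; the proofs are below) =====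
def Claim_equal_verifyMaxCluster : Prop := ∀ (bootingPower : List Int) (processingPower : List Int) (maxPower : Int), Dom_verifyMaxCluster bootingPower processingPower maxPower → Spec_verifyMaxCluster bootingPower processingPower maxPower (verifyMaxCluster bootingPower processingPower maxPower)

-- ===== LEMMAS AND PROOFS =====

-- proof-only abbreviations: window sum and the specification of the monotonic deque
def winSum (pp : List Int) (l r : Nat) : Int := ((pp.drop l).take (r - l)).sum

def goodIdx (bp : List Int) (r j : Nat) : Bool :=
  (List.range' (j+1) (r - (j+1))).all (fun k => decide (bp.getD k 0 < bp.getD j 0))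

def dqSpec (bp : List Int) (l r : Nat) : List Nat :=
  (List.range' l (r - l)).filter (goodIdx bp r)

lemma winSum_push (pp : List Int) (l r : Nat) (h : l ≤ r) :
    pushS pp (winSum pp l r) r = winSum pp l (r+1) := by
  unfold pushS winSum
  have hr : r + 1 - l = (r - l) + 1 := by omega
  rw [hr, List.take_add_one, List.sum_append]
  rw [List.getElem?_drop]
  have hE : l + (r - l) = r := by omega
  rw [hE]
  by_cases hrl : r < pp.length
  · simp [List.getD, hrl]
  · simp [hrl]

lemma winSum_pop (pp : List Int) (l r : Nat) (h : l < r) :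
    sPop pp (winSum pp l r) l = winSum pp (l+1) r := by
  unfold sPop winSum
  by_cases hl : l < pp.length
  · rw [List.drop_eq_getElem_cons hl]
    have hr : r - l = (r - (l+1)) + 1 := by omega
    rw [hr, List.take_succ_cons, List.sum_cons]
    simp [hl, List.getD]
  · have h1 : pp.drop l = [] := List.drop_eq_nil_of_le (by omega)
    have h2 : pp.drop (l+1) = [] := List.drop_eq_nil_of_le (by omega)
    simp [h1, h2, hl]

lemma goodIdx_iff {bp : List Int} {r j : Nat} :
    goodIdx bp r j = true ↔ ∀ k, j < k → k < r → bp.getD k 0 < bp.getD j 0 := by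
  unfold goodIdx
  rw [List.all_eq_true]
  constructor
  · intro H k h1 h2
    have hk : k ∈ List.range' (j+1) (r - (j+1)) := by
      rw [List.mem_range']
      exact ⟨k - (j+1), by omega, by omega⟩
    simpa using H k hk
  · intro H k hk
    rw [List.mem_range'] at hk
    obtain ⟨i, hi, he⟩ := hk
    simpa using H k (by omega) (by omega)

lemma mem_dqSpec {bp : List Int} {l r j : Nat} (hm : j ∈ dqSpec bp l r) :
    l ≤ j ∧ j < r ∧ goodIdx bp r j = true := by
  unfold dqSpec at hm
  have h1 := List.mem_filter.1 hm
  have h2 := List.mem_range'.1 h1.1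
  obtain ⟨i, hi, he⟩ := h2
  exact ⟨by omega, by omega, h1.2⟩

lemma dqSpec_pairwise (bp : List Int) (l r : Nat) :
    (dqSpec bp l r).Pairwise (fun a b => bp.getD b 0 < bp.getD a 0) := by
  have hlt : (dqSpec bp l r).Pairwise (· < ·) :=
    ((List.isChain_lt_range' (step := 1) l (r-l) (by omega)).pairwise).sublist List.filter_sublist
  refine List.Pairwise.imp_of_mem ?_ hlt
  intro a b ha hb hab
  have hga := (mem_dqSpec ha).2.2
  have hb2 := mem_dqSpec hb
  exact goodIdx_iff.1 hga b hab hb2.2.1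

lemma dqSpec_extend (bp : List Int) (l r : Nat) (h : l ≤ r) :
    dqSpec bp l (r+1)
      = (dqSpec bp l r).filter (fun j => decide (bp.getD r 0 < bp.getD j 0)) ++ [r] := by
  unfold dqSpec
  have h1 : r + 1 - l = (r - l) + 1 := by omega
  have h2 : List.range' l ((r-l)+1) = List.range' l (r-l) ++ [r] := by
    have := List.range'_concat (s := l) (n := r - l) (step := 1)
    simpa [Nat.one_mul, show l + (r - l) = r from by omega] using this
  rw [h1, h2, List.filter_append, List.filter_filter]
  congr 1
  · apply List.filter_congr
    intro j hj
    have hj2 := List.mem_range'.1 hj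
    obtain ⟨i, hi, he⟩ := hj2
    have hjr : j < r := by omega
    unfold goodIdx
    have h3 : r + 1 - (j+1) = (r - (j+1)) + 1 := by omega
    have h4 : List.range' (j+1) ((r-(j+1))+1) = List.range' (j+1) (r-(j+1)) ++ [r] := by
      have := List.range'_concat (s := j+1) (n := r - (j+1)) (step := 1)
      simpa [Nat.one_mul, show j + 1 + (r - (j+1)) = r from by omega] using this
    rw [h3, h4, List.all_append]
    simp [Bool.and_comm]
  · simp [goodIdx]

lemma dqSpec_cons (bp : List Int) (l r : Nat) (h : l < r) :
    dqSpec bp l r = (if goodIdx bp r l then [l] else []) ++ dqSpec bp (l+1) r := by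
  unfold dqSpec
  have h1 : r - l = (r - (l+1)) + 1 := by omega
  rw [h1, List.range'_succ, List.filter_cons]
  split_ifs <;> simp

lemma dqSpec_head_max (bp : List Int) (l r : Nat) (h : l < r) :
    ∃ j, (dqSpec bp l r).head? = some j ∧ l ≤ j ∧ j < r ∧
      ∀ k, l ≤ k → k < r → bp.getD k 0 ≤ bp.getD j 0 := by
  induction r with
  | zero => omega
  | succ r ih =>
    by_cases hlr : l < r
    · obtain ⟨j, hj, hlj, hjr, hmax⟩ := ih hlr
      rw [dqSpec_extend bp l r (by omega)]
      by_cases hr : bp.getD r 0 < bp.getD j 0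
      · obtain ⟨t, ht⟩ : ∃ t, dqSpec bp l r = j :: t := by
          cases hdq : dqSpec bp l r with
          | nil => rw [hdq] at hj; simp at hj
          | cons a t => rw [hdq] at hj; simp at hj; exact ⟨t, by rw [hj]⟩
        rw [ht, List.filter_cons]
        simp only [hr, decide_true, if_true]
        refine ⟨j, by simp, hlj, by omega, ?_⟩
        intro k hk1 hk2
        by_cases hk3 : k < r
        · exact hmax k hk1 hk3
        · have : k = r := by omega
          subst this; omega
      · have hfil : (dqSpec bp l r).filter (fun x => decide (bp.getD r 0 < bp.getD x 0)) = [] := by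
          rw [List.filter_eq_nil_iff]
          intro x hx
          have hx2 := mem_dqSpec hx
          have := hmax x hx2.1 hx2.2.1
          simp only [decide_eq_true_eq, not_lt]
          omega
        rw [hfil]
        refine ⟨r, by simp, by omega, by omega, ?_⟩
        intro k hk1 hk2
        by_cases hk3 : k < r
        · have := hmax k hk1 hk3; omega
        · have : k = r := by omega
          subst this; omega
    · have hl : l = r := by omega
      subst hl
      have : dqSpec bp l (l+1) = [l] := by
        unfold dqSpec goodIdx
        simp [show l + 1 - l = 1 by omega]
      rw [this]
      exact ⟨l, by simp, le_refl l, by omega, fun k h1 h2 => by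
        have : k = l := by omega
        subst this; omega⟩

lemma dqSpec_advance (bp : List Int) (l r : Nat) (h : l < r) :
    dqSpec bp (l+1) r
      = if goodIdx bp r l then (dqSpec bp l r).tail else dqSpec bp l r := by
  rw [dqSpec_cons bp l r h]
  split_ifs <;> simp

lemma dqSpec_head_eq_iff (bp : List Int) (l r : Nat) (h : l < r) :
    ((dqSpec bp l r).headD 0 = l) ↔ goodIdx bp r l = true := by
  rw [dqSpec_cons bp l r h]
  by_cases hg : goodIdx bp r l
  · simp [hg]
  · simp only [hg, if_false, Bool.false_eq_true, iff_false, List.nil_append]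
    obtain ⟨j, hj, hlj, hjr, hmax⟩ := dqSpec_head_max bp l r h
    have hg' : goodIdx bp r l = false := by simpa using hg
    rw [dqSpec_cons bp l r h, hg'] at hj
    simp only [Bool.false_eq_true, if_false, List.nil_append] at hj
    cases hdq : dqSpec bp (l+1) r with
    | nil => rw [hdq] at hj; simp at hj
    | cons a t =>
      have ha : a ∈ dqSpec bp (l+1) r := by rw [hdq]; simp
      have := (mem_dqSpec ha).1
      simp; omega

lemma dqPush_drop (bp : List Int) (i : Nat) (hd : Nat) :
    ∀ (dq : List Nat), hd ≤ dq.length →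
    (dq.drop hd).Pairwise (fun a b => bp.getD b 0 < bp.getD a 0) →
    (dqPush bp dq hd i).drop hd
        = (dq.drop hd).filter (fun j => decide (bp.getD i 0 < bp.getD j 0)) ++ [i]
      ∧ hd ≤ (dqPush bp dq hd i).length := by
  intro dq
  induction dq using List.reverseRecOn with
  | nil =>
    intro hle _
    have : hd = 0 := by simpa using hle
    subst this
    rw [dqPush]
    simp
  | append_singleton dq a ih =>
    intro hle hpw
    have hlen : (dq ++ [a]).length = dq.length + 1 := by simp
    have hlast : (dq ++ [a]).getLast?.getD 0 = a := by simp
    rw [dqPush]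
    by_cases hc : hd < (dq ++ [a]).length ∧ bp.getD ((dq ++ [a]).getLast?.getD 0) 0 ≤ bp.getD i 0
    · rw [if_pos hc]
      have hdl : (dq ++ [a]).dropLast = dq := by simp
      rw [hdl]
      have hle' : hd ≤ dq.length := by simp at hc; omega
      have hdrop : (dq ++ [a]).drop hd = dq.drop hd ++ [a] :=
        List.drop_append_of_le_length hle'
      have hpw' : (dq.drop hd).Pairwise (fun a b => bp.getD b 0 < bp.getD a 0) := by
        rw [hdrop] at hpw
        exact (List.pairwise_append.1 hpw).1
      have hIH := ih hle' hpw'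
      refine ⟨?_, hIH.2⟩
      rw [hIH.1, hdrop, List.filter_append]
      rw [hlast] at hc
      have hna : ¬ (bp.getD i 0 < bp.getD a 0) := by omega
      rw [List.filter_cons_of_neg (by simpa using hna), List.filter_nil, List.append_nil]
    · rw [if_neg hc]
      push Not at hc
      rw [hlast] at hc
      have hdrop2 : ((dq ++ [a]) ++ [i]).drop hd = (dq ++ [a]).drop hd ++ [i] :=
        List.drop_append_of_le_length (by omega)
      by_cases hhd : hd < (dq ++ [a]).length
      · have hgt := hc hhd
        have hle' : hd ≤ dq.length := by simp at hhd; omega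
        have hdrop : (dq ++ [a]).drop hd = dq.drop hd ++ [a] :=
          List.drop_append_of_le_length hle'
        have hall : ∀ j ∈ (dq ++ [a]).drop hd, bp.getD i 0 < bp.getD j 0 := by
          rw [hdrop] at hpw ⊢
          intro j hj
          rcases List.mem_append.1 hj with hj1 | hj1
          · have := (List.pairwise_append.1 hpw).2.2 j hj1 a (by simp)
            omega
          · simp at hj1
            subst hj1
            omega
        refine ⟨?_, by simp; omega⟩
        rw [hdrop2, List.filter_eq_self.2 (by intro x hx; simpa using hall x hx)]
      · have he : (dq ++ [a]).drop hd = [] := List.drop_eq_nil_of_le (by omega)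
        refine ⟨?_, by simp; omega⟩
        rw [hdrop2, he]
        simp

lemma power_eq (bp pp : List Int) (l r : Nat) (h1 : l < r) (h2 : r ≤ bp.length) :
    calculatePower (PySem.List.slice bp (some (l : Int)) (some (r : Int)))
                   (PySem.List.slice pp (some (l : Int)) (some (r : Int)))
      = bp.getD ((dqSpec bp l r).headD 0) 0 + winSum pp l r * ((r : Int) - (l : Int)) := by
  unfold calculatePower
  rw [PySem.List.slice_natCast, PySem.List.slice_natCast]
  have hlen : ((bp.drop l).take (r - l)).length = r - l := by
    simp
    omega
  have hcast : (((bp.drop l).take (r - l)).length : Int) = (r : Int) - (l : Int) := by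
    rw [hlen]
    omega
  rw [hcast]
  have hsum : ((pp.drop l).take (r - l)).sum = winSum pp l r := rfl
  rw [hsum]
  congr 1
  obtain ⟨j, hj, hlj, hjr, hmax⟩ := dqSpec_head_max bp l r h1
  have hheadD : (dqSpec bp l r).headD 0 = j := by
    cases hdq : dqSpec bp l r with
    | nil => rw [hdq] at hj; simp at hj
    | cons a t => rw [hdq] at hj; simp at hj; simp [hj]
  rw [hheadD]
  set w := (bp.drop l).take (r - l) with hw
  have hwne : w ≠ [] := by
    intro hnil
    have := congrArg List.length hnil
    rw [hlen] at this
    simp at this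
    omega
  have hmem_iff : ∀ x ∈ w, ∃ k, l ≤ k ∧ k < r ∧ x = bp.getD k 0 := by
    intro x hx
    obtain ⟨t, ht, hxe⟩ := List.mem_iff_getElem.1 hx
    refine ⟨l + t, by omega, by rw [hlen] at ht; omega, ?_⟩
    rw [← hxe]
    rw [hlen] at ht
    have hbl : l + t < bp.length := by omega
    simp only [hw, List.getElem_take, List.getElem_drop]
    simp [List.getD, List.getElem?_eq_getElem hbl]
  have hjmem : bp.getD j 0 ∈ w := by
    rw [List.mem_iff_getElem]
    refine ⟨j - l, by rw [hlen]; omega, ?_⟩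
    have hj2 : l + (j - l) = j := by omega
    have hjb : j < bp.length := by omega
    simp only [hw, List.getElem_take, List.getElem_drop, hj2]
    simp [List.getD, List.getElem?_eq_getElem hjb]
  cases hm : PySem.List.max? w (fun y => y) with
  | none => exact absurd ((PySem.List.max?_eq_none_iff _ _).1 hm) hwne
  | some m =>
    have hm_mem := PySem.List.max?_mem hm
    have hm_max := PySem.List.max?_isMax hm
    simp only [Option.getD_some]
    obtain ⟨k, hk1, hk2, hk3⟩ := hmem_iff m hm_mem
    have h4 : m ≤ bp.getD j 0 := by rw [hk3]; exact hmax k hk1 hk2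
    have h5 : bp.getD j 0 ≤ m := hm_max _ hjmem
    omega

lemma dqSpec_ne_nil (bp : List Int) (l r : Nat) (h : l < r) : dqSpec bp l r ≠ [] := by
  obtain ⟨j, hj, _⟩ := dqSpec_head_max bp l r h
  intro hnil
  rw [hnil] at hj
  simp at hj

lemma loopAB (bp pp : List Int) (mx : Int) :
    ∀ fuel l r s dq hd q, (bp.length - l) + (bp.length - r) < fuel → l < r →
    hd ≤ dq.length → dq.drop hd = dqSpec bp l r → s = winSum pp l r →
    loopA bp pp mx l r ((r : Int) - (l : Int) - 1) q = loopB bp pp mx l r s dq hd q := by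
  intro fuel
  induction fuel with
  | zero => intro l r s dq hd q hfuel; omega
  | succ fuel ih =>
    intro l r s dq hd q hfuel hlr hhd hdq hs
    rw [loopA, loopB]
    by_cases hcond : l < bp.length ∧ r < bp.length
    · rw [dif_pos hcond, dif_pos hcond]
      have hne : dqSpec bp l r ≠ [] := dqSpec_ne_nil bp l r hlr
      have hhd_lt : hd < dq.length := by
        by_contra hc
        have : dq.drop hd = [] := List.drop_eq_nil_of_le (by omega)
        rw [this] at hdq
        exact hne hdq.symm
      have hgethd : dq.getD hd 0 = (dqSpec bp l r).headD 0 := by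
        rw [← hdq]
        rw [List.getD_eq_getElem?_getD, ← List.head?_drop]
        cases List.drop hd dq <;> rfl
      have hpw := power_eq bp pp l r hlr (le_of_lt hcond.2)
      have hceq : (calculatePower (PySem.List.slice bp (some (l : Int)) (some (r : Int)))
                      (PySem.List.slice pp (some (l : Int)) (some (r : Int))) > mx)
          = (bp.getD (dq.getD hd 0) 0 + s * ((r : Int) - (l : Int)) > mx) := by
        rw [hpw, hgethd, hs]
      have hpair : (dq.drop hd).Pairwise (fun a b => bp.getD b 0 < bp.getD a 0) := by
        rw [hdq]; exact dqSpec_pairwise bp l r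
      by_cases hgt : bp.getD (dq.getD hd 0) 0 + s * ((r : Int) - (l : Int)) > mx
      · rw [if_pos (by rw [hceq]; exact hgt), if_pos hgt]
        -- the popleft step: dq.drop (hdAdv dq hd l) = dqSpec bp (l+1) r
        have hcondB : (hd < dq.length ∧ dq.getD hd 0 = l) ↔ goodIdx bp r l = true := by
          rw [hgethd]
          constructor
          · intro hx; exact (dqSpec_head_eq_iff bp l r hlr).1 hx.2
          · intro hx; exact ⟨hhd_lt, (dqSpec_head_eq_iff bp l r hlr).2 hx⟩
        have hadv : dq.drop (hdAdv dq hd l) = dqSpec bp (l+1) r := by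
          unfold hdAdv
          rw [dqSpec_advance bp l r hlr]
          by_cases hg : goodIdx bp r l
          · rw [if_pos (hcondB.2 hg), if_pos hg]
            rw [← List.tail_drop, hdq]
          · rw [if_neg (fun hx => hg (hcondB.1 hx)), if_neg hg, hdq]
        have hadv_le : hdAdv dq hd l ≤ dq.length := by
          unfold hdAdv
          split_ifs <;> omega
        by_cases heq : l + 1 = r
        · rw [if_pos heq, if_pos heq]
          -- window becomes [r, r+1): dqSpec (l+1) r = dqSpec r r = []
          have hs1 : sPop pp s l = winSum pp (l+1) r := by rw [hs]; exact winSum_pop pp l r hlr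
          have hs2 : pushS pp (sPop pp s l) r = winSum pp (l+1) (r+1) := by
            rw [hs1]; exact winSum_push pp (l+1) r (by omega)
          have hpair' : (dq.drop (hdAdv dq hd l)).Pairwise
              (fun a b => bp.getD b 0 < bp.getD a 0) := by
            rw [hadv]; exact dqSpec_pairwise bp (l+1) r
          have hpush := dqPush_drop bp r (hdAdv dq hd l) dq hadv_le hpair'
          have hdq' : (dqPush bp dq (hdAdv dq hd l) r).drop (hdAdv dq hd l)
              = dqSpec bp (l+1) (r+1) := by
            rw [hpush.1, hadv, dqSpec_extend bp (l+1) r (by omega)]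
          have hccz : (0 : Int) = ((r+1 : Nat) : Int) - ((l+1 : Nat) : Int) - 1 := by
            push_cast; omega
          rw [hccz]
          exact ih (l+1) (r+1) _ _ _ _ (by omega) (by omega) hpush.2 hdq' hs2
        · rw [if_neg heq, if_neg heq]
          have hs1 : sPop pp s l = winSum pp (l+1) r := by rw [hs]; exact winSum_pop pp l r hlr
          have hcc : ((r : Int) - (l : Int) - 1) - 1 = (r : Int) - ((l+1 : Nat) : Int) - 1 := by
            push_cast; ring
          rw [hcc]
          exact ih (l+1) r _ _ _ _ (by omega) (by omega) hadv_le hadv hs1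
      · rw [if_neg (by rw [hceq]; exact hgt), if_neg hgt]
        have hs2 : pushS pp s r = winSum pp l (r+1) := by
          rw [hs]; exact winSum_push pp l r (by omega)
        have hpush := dqPush_drop bp r hd dq hhd hpair
        have hdq' : (dqPush bp dq hd r).drop hd = dqSpec bp l (r+1) := by
          rw [hpush.1, hdq, dqSpec_extend bp l r (by omega)]
        have hcc : ((r : Int) - (l : Int) - 1) + 1 = ((r+1 : Nat) : Int) - (l : Int) - 1 := by
          push_cast; ring
        rw [hcc]
        exact ih l (r+1) _ _ _ _ (by omega) (by omega) hpush.2 hdq' hs2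
    · rw [dif_neg hcond, dif_neg hcond]

-- ===== VERDICT (by name: the statement is the Claim_ definition above) =====
theorem verifyMaxCluster_spec : Claim_equal_verifyMaxCluster := by
  unfold Claim_equal_verifyMaxCluster
  intro bp pp mx _
  unfold Spec_verifyMaxCluster verifyMaxCluster verifyMaxCluster_alt
  by_cases hn : bp.length = 0
  · rw [if_pos hn, loopA, dif_neg (by omega)]
    simp
  · rw [if_neg hn]
    have hdq0 : (dqPush bp [] 0 0).drop 0 = dqSpec bp 0 1 := by
      rw [dqPush]
      simp [dqSpec, goodIdx, List.range'_succ]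
    have hs0 : pushS pp 0 0 = winSum pp 0 1 := by
      cases pp <;> simp [pushS, winSum, List.getD]
    have hlen0 : (0 : Nat) ≤ (dqPush bp [] 0 0).length := by omega
    have h := loopAB bp pp mx (2 * bp.length + 1) 0 1 (pushS pp 0 0) (dqPush bp [] 0 0) 0 0
      (by omega) (by omega) hlen0 hdq0 hs0
    have hcc : ((1 : Nat) : Int) - ((0 : Nat) : Int) - 1 = 0 := by norm_num
    rw [hcc] at h
    exact h
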